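-- pv_equiv track=rewrite | github.com/Antonio-JP/dd_functions | ajpastor/dd_functions/ddFunction.py | _m_replace
-- ===== SOURCE A (Python) =====
-- def _indices(string, sep):
--     try:
--         index = string.index(sep)
--         return [index] + [el+index+len(sep) for el in _indices(string[index+len(sep):],sep)]
--     except ValueError:
--         return []
--
-- def _m_indices(string, *seps):
--     ## We assume no possible overlapping can occur between elements in seps
--     all_index = []
--     for sep in seps:
--         all_index += [(el,sep) for el in _indices(string,sep)]
--     all_index.sort()
--
--     return all_index
--
-- def _m_replace(string, to_replace, escape=("(",")")):
--     ## Checking if there are scape characters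
--     if(not escape is None):
--         pos_init = string.find(escape[0])
--         if(pos_init >= 0 ):
--             ## Escape initial character found, skipping outside the escape
--             pos_end = len(string)
--             pos_end = string.rfind(escape[1])
--             if(pos_end <= pos_init):
--                 pos_end = len(string)
--
--             return string[:pos_init+1] + _m_replace(string[pos_init+1 :pos_end], to_replace, None) + string[pos_end:]
--
--     ## No escape characters: doing normal computation
--     all_index = _m_indices(string, *to_replace.keys())
--     res = ""
--     current_index = 0
--     for el in all_index:
--         res += string[current_index:el[0]] + to_replace[el[1]]
--         current_index = el[0]+len(el[1])
--     res += string[current_index:]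
--     return res
-- ===== SOURCE B (Python) =====
-- def _replace_all(string, to_replace):
--     ## collect all occurrences of every key with an iterative find-scan (no slicing)
--     occs = []
--     for sep in to_replace:
--         i = string.find(sep)
--         while i != -1:
--             occs.append((i, sep))
--             i = string.find(sep, i + len(sep))
--     occs.sort()
--     ## single pass gluing the pieces
--     parts = []
--     cur = 0
--     for i, sep in occs:
--         parts.append(string[cur:i])
--         parts.append(to_replace[sep])
--         cur = i + len(sep)
--     parts.append(string[cur:])
--     return "".join(parts)
--
-- def _m_replace(string, to_replace, escape=("(",")")):
--     lo, hi = 0, len(string)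
--     if escape is not None:
--         pos_init = string.find(escape[0])
--         if pos_init >= 0:
--             pos_end = string.rfind(escape[1])
--             if pos_end <= pos_init:
--                 pos_end = len(string)
--             lo, hi = pos_init + 1, pos_end
--     return string[:lo] + _replace_all(string[lo:hi], to_replace) + string[hi:]
-- ===== Notes on version B (the rewrite author's own statement) =====
-- stated objective: alternative
-- what changed: Occurrence collection by an iterative str.find scan with a moving start index (no slicing, no recursion) replaces A's recursive slice-and-reindex _indices, and the escape region is handled by computing (lo,hi) bounds once instead of a recursive self-call; the sorted (index,sep) replacement order is preserved.
import Mathlib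
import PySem

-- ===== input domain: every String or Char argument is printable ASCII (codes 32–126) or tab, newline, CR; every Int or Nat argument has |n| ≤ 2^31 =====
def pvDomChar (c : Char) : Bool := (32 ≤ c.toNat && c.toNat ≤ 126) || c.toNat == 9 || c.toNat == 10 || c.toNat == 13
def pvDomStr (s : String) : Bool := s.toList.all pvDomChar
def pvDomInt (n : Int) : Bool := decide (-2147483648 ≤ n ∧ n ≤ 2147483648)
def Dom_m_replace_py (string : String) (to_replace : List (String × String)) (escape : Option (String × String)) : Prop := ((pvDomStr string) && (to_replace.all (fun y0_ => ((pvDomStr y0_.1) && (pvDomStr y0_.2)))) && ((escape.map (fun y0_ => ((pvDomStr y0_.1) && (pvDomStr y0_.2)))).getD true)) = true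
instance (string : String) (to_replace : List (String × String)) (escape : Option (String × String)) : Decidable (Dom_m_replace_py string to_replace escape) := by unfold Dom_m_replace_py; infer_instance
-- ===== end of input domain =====

-- B replaces A's recursive-slicing index search by an iterative find-scan with a moving start
-- index and drops the self-recursion on the escape region (objective: alternative — no slicing,
-- no recursion). A mutates nothing; the equivalence is about the return value.

-- ===== PORT A =====
-- _indices: try string.index(sep) … recursion on the slice after the match; ValueError → [].
-- (the `sep ≠ []` conjunct is a totality guard only: Python diverges (RecursionError) on sep = '',
--  which Pre_m_replace_py excludes)
def aIndices (s sep : List Char) : List Nat :=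
  let i := PySem.Chars.find s sep
  if h : 0 ≤ i ∧ sep ≠ [] then
    i.toNat :: (aIndices (s.drop (i.toNat + sep.length)) sep).map (fun el => el + (i.toNat + sep.length))
  else []
termination_by s.length
decreasing_by
  have h1 : sep.length ≤ s.length :=
    List.IsInfix.length_le ((PySem.Chars.find_nonneg_iff s sep).mp h.1)
  have h2 : 0 < sep.length := List.length_pos_of_ne_nil h.2
  simp only [List.length_drop]; omega

-- _m_indices: per-sep index lists tagged with the sep, then .sort() on the (index, sep) tuples
def aMIndices (s : List Char) (seps : List String) : List (Nat × String) :=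
  PySem.List.sorted2
    (seps.foldl (fun acc sep => acc ++ (aIndices s sep.toList).map (fun el => (el, sep))) [])
    (fun p => p.1) (fun p => p.2)

-- the code below the escape check: res built left to right from the sorted occurrence list
def aBody (s : List Char) (to_replace : List (String × String)) : List Char :=
  let d := PySem.Dict.ofList to_replace
  let all_index := aMIndices s d.keys
  let st := all_index.foldl
    (fun (acc : List Char × Nat) el =>
      (acc.1 ++ PySem.List.slice s (some (acc.2 : Int)) (some (el.1 : Int)) ++ (d.getD el.2 "").toList,
       el.1 + el.2.length)) ([], 0)
  st.1 ++ PySem.List.slice s (some (st.2 : Int)) none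

def m_replace_py (string : String) (to_replace : List (String × String)) (escape : Option (String × String)) : String :=
  match escape with
  | some esc =>
    let s := string.toList
    let pos_init := PySem.Chars.find s esc.1.toList
    if 0 ≤ pos_init then
      let pos_end0 := PySem.Chars.rfind s esc.2.toList
      let pos_end : Int := if pos_end0 ≤ pos_init then (s.length : Int) else pos_end0
      String.ofList (PySem.List.slice s none (some (pos_init + 1)) ++
        (m_replace_py (String.ofList (PySem.List.slice s (some (pos_init + 1)) (some pos_end))) to_replace none).toList ++
        PySem.List.slice s (some pos_end) none)
    else String.ofList (aBody s to_replace)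
  | none => String.ofList (aBody string.toList to_replace)
termination_by (match escape with | some _ => 1 | none => 0)
decreasing_by simp

-- ===== PORT B =====
-- while i != -1: record i; i = string.find(sep, i + len(sep))
-- (`sep ≠ []` and `start ≤ s.length` are totality guards only: Python's loop diverges on sep = '',
--  excluded by Pre_m_replace_py, and start never exceeds len(s) when it terminates)
def bScan (s sep : List Char) (start : Nat) : List Nat :=
  let i := PySem.Chars.findFrom s sep (start : Int) none
  if h : 0 ≤ i ∧ sep ≠ [] ∧ start ≤ s.length then
    i.toNat :: bScan s sep (i.toNat + sep.length)
  else []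
termination_by s.length + 1 - start
decreasing_by
  have hne : PySem.Chars.findFrom s sep (start : Int) none ≠ -1 := by omega
  have h1 := (PySem.Chars.findFrom_natCast_spec s sep start h.2.2 hne).1
  have h2 : 0 < sep.length := List.length_pos_of_ne_nil h.2.1
  omega

-- _replace_all: one find-scan per key, sort the (index, sep) pairs, one gluing pass, ''.join
def bReplaceAll (s : List Char) (to_replace : List (String × String)) : List Char :=
  let d := PySem.Dict.ofList to_replace
  let occs := PySem.List.sorted2
    (d.keys.foldl (fun acc sep => acc ++ (bScan s sep.toList 0).map (fun i => (i, sep))) [])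
    (fun p => p.1) (fun p => p.2)
  let st := occs.foldl
    (fun (acc : List (List Char) × Nat) p =>
      (acc.1 ++ [PySem.List.slice s (some (acc.2 : Int)) (some (p.1 : Int)), (d.getD p.2 "").toList],
       p.1 + p.2.length)) ([], 0)
  PySem.Chars.join [] (st.1 ++ [PySem.List.slice s (some (st.2 : Int)) none])

def m_replace_py_alt (string : String) (to_replace : List (String × String)) (escape : Option (String × String)) : String :=
  let s := string.toList
  let lohi : Int × Int :=
    match escape with
    | none => (0, (s.length : Int))
    | some esc =>
      let pos_init := PySem.Chars.find s esc.1.toList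
      if 0 ≤ pos_init then
        let pos_end0 := PySem.Chars.rfind s esc.2.toList
        let pos_end : Int := if pos_end0 ≤ pos_init then (s.length : Int) else pos_end0
        (pos_init + 1, pos_end)
      else (0, (s.length : Int))
  String.ofList (PySem.List.slice s none (some lohi.1) ++
    bReplaceAll (PySem.List.slice s (some lohi.1) (some lohi.2)) to_replace ++
    PySem.List.slice s (some lohi.2) none)

-- ===== PRECONDITION & SPEC =====
-- Pre_ excludes dictionaries with an empty-string key: there A never returns
-- (string.index('') == 0 makes _indices recurse forever — RecursionError).
def Pre_m_replace_py (string : String) (to_replace : List (String × String)) (escape : Option (String × String)) : Prop :=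
  ∀ p ∈ to_replace, p.1 ≠ ""
instance (string : String) (to_replace : List (String × String)) (escape : Option (String × String)) : Decidable (Pre_m_replace_py string to_replace escape) := by unfold Pre_m_replace_py; infer_instance

def pvWitness_m_replace_py : String × (List (String × String)) × (Option (String × String)) :=
  ("a(bc)d", [("b", "XY"), ("c", "")], some ("(", ")"))

def Spec_m_replace_py (string : String) (to_replace : List (String × String)) (escape : Option (String × String)) (out : String) : Prop := out = m_replace_py_alt string to_replace escape
instance (string : String) (to_replace : List (String × String)) (escape : Option (String × String)) (out : String) : Decidable (Spec_m_replace_py string to_replace escape out) := by unfold Spec_m_replace_py; infer_instance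

-- ===== CLAIM (what is proved, stated in full; the proofs are below) =====
def Claim_equal_m_replace_py : Prop := ∀ (string : String) (to_replace : List (String × String)) (escape : Option (String × String)), Dom_m_replace_py string to_replace escape → Pre_m_replace_py string to_replace escape → Spec_m_replace_py string to_replace escape (m_replace_py string to_replace escape)

-- ===== LEMMAS AND PROOFS =====

-- B's find-from-`start` scan is A's recursive scan of the dropped suffix, shifted by `start`.
lemma bScan_eq_aIndices_aux (n : Nat) : ∀ (s sep : List Char) (k : Nat), k ≤ s.length →
    s.length - k ≤ n → bScan s sep k = (aIndices (s.drop k) sep).map (fun x => x + k) := by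
  induction n with
  | zero =>
    intro s sep k hk hn
    rw [bScan, aIndices]
    rw [PySem.Chars.findFrom_natCast s sep k hk]
    by_cases hf : PySem.Chars.find (s.drop k) sep = -1
    · simp [hf]
    · have hf0 : 0 ≤ PySem.Chars.find (s.drop k) sep := by
        have := PySem.Chars.neg_one_le_find (s.drop k) sep; omega
      by_cases hsep : sep = []
      · simp [hsep]
      · exfalso
        have hpre := (PySem.Chars.find_spec hf0).1
        have hlen := List.IsPrefix.length_le hpre
        have h2 : 0 < sep.length := List.length_pos_of_ne_nil hsep
        simp only [List.length_drop] at hlen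
        omega
  | succ n ih =>
    intro s sep k hk hn
    rw [bScan, aIndices]
    rw [PySem.Chars.findFrom_natCast s sep k hk]
    by_cases hf : PySem.Chars.find (s.drop k) sep = -1
    · simp [hf]
    · have hf0 : 0 ≤ PySem.Chars.find (s.drop k) sep := by
        have := PySem.Chars.neg_one_le_find (s.drop k) sep; omega
      by_cases hsep : sep = []
      · simp [hsep]
      · set f := PySem.Chars.find (s.drop k) sep with hfdef
        have hpre := (PySem.Chars.find_spec hf0).1
        have hlenpre := List.IsPrefix.length_le hpre
        have hL : 0 < sep.length := List.length_pos_of_ne_nil hsep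
        have hfle : f ≤ (s.drop k).length := PySem.Chars.find_le_length (s.drop k) sep
        simp only [List.length_drop] at hlenpre hfle
        have hfit : f.toNat + sep.length ≤ s.length - k := by omega
        simp only [hf, if_false]
        rw [dif_pos (⟨by omega, hsep, hk⟩ : 0 ≤ (k:Int) + f ∧ sep ≠ [] ∧ k ≤ s.length),
            dif_pos (⟨hf0, hsep⟩ : 0 ≤ f ∧ sep ≠ [])]
        have htn : ((k : Int) + f).toNat = k + f.toNat := by omega
        rw [htn, List.drop_drop]
        have hrec := ih s sep (k + (f.toNat + sep.length)) (by omega) (by omega)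
        rw [List.map_cons, List.map_map, Nat.add_assoc k f.toNat sep.length, hrec]
        congr 1
        · omega
        · congr 1
          funext x
          simp only [Function.comp]
          omega

lemma bScan_eq_aIndices (s sep : List Char) : bScan s sep 0 = aIndices s sep := by
  have := bScan_eq_aIndices_aux s.length s sep 0 (by omega) (by omega)
  simpa using this

lemma join_nil_eq_flatten (ps : List (List Char)) : PySem.Chars.join [] ps = ps.flatten := by
  simp only [PySem.Chars.join]
  induction ps with
  | nil => simp [List.intercalate]
  | cons h t ih => cases t <;> simp_all [List.intercalate, List.intersperse]

-- the two gluing passes build the same string: A's accumulator is the flatten of B's parts list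
lemma fold_pairs (s : List Char) (d : PySem.Dict String String) (occs : List (Nat × String)) :
    ∀ (ps : List (List Char)) (cur : Nat),
    occs.foldl (fun (acc : List Char × Nat) el =>
      (acc.1 ++ PySem.List.slice s (some (acc.2 : Int)) (some (el.1 : Int)) ++ (d.getD el.2 "").toList,
       el.1 + el.2.length)) (ps.flatten, cur)
    = ((occs.foldl (fun (acc : List (List Char) × Nat) p =>
      (acc.1 ++ [PySem.List.slice s (some (acc.2 : Int)) (some (p.1 : Int)), (d.getD p.2 "").toList],
       p.1 + p.2.length)) (ps, cur)).1.flatten,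
       (occs.foldl (fun (acc : List (List Char) × Nat) p =>
      (acc.1 ++ [PySem.List.slice s (some (acc.2 : Int)) (some (p.1 : Int)), (d.getD p.2 "").toList],
       p.1 + p.2.length)) (ps, cur)).2) := by
  induction occs with
  | nil => intro ps cur; rfl
  | cons p t ih =>
    intro ps cur
    simp only [List.foldl_cons]
    have h1 : (ps ++ [PySem.List.slice s (some (cur : Int)) (some (p.1 : Int)), (d.getD p.2 "").toList]).flatten
        = ps.flatten ++ PySem.List.slice s (some (cur : Int)) (some (p.1 : Int)) ++ (d.getD p.2 "").toList := by
      simp [List.flatten_append]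
    rw [← h1, ih]

lemma body_eq (s : List Char) (tr : List (String × String)) : aBody s tr = bReplaceAll s tr := by
  simp only [aBody, bReplaceAll, aMIndices]
  have hocc : ∀ (acc : List (Nat × String)), ∀ sep ∈ (PySem.Dict.ofList tr).keys,
      acc ++ (bScan s sep.toList 0).map (fun i => (i, sep))
        = acc ++ (aIndices s sep.toList).map (fun el => (el, sep)) := by
    intro acc sep _
    rw [bScan_eq_aIndices]
  rw [PySem.List.foldl_congr_mem _ _ _ _ hocc]
  have := fold_pairs s (PySem.Dict.ofList tr)
    (PySem.List.sorted2
      ((PySem.Dict.ofList tr).keys.foldl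
        (fun acc sep => acc ++ (aIndices s sep.toList).map (fun el => (el, sep))) [])
      (fun p => p.1) (fun p => p.2)) [] 0
  simp only [List.flatten_nil] at this
  rw [this, join_nil_eq_flatten]
  simp [List.flatten_append]

-- ===== VERDICT (by name: the statement is the Claim_ definition above) =====
-- escape framing: the none-branch of both ports is the respective core on the full string
lemma slice_full (s : List Char) : PySem.List.slice s (some (0 : Int)) (some ((s.length : Nat) : Int)) = s := by
  rw [PySem.List.slice_zero_start, PySem.List.slice_to_natCast, List.take_length]

theorem m_replace_py_spec : Claim_equal_m_replace_py := by
  intro str tr esc _ _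
  unfold Spec_m_replace_py
  match esc with
  | none =>
    rw [m_replace_py, m_replace_py_alt]
    simp only []
    rw [body_eq]
    congr 1
    rw [slice_full]
    simp [PySem.List.slice_to, PySem.List.slice_from]
  | some e =>
    rw [m_replace_py, m_replace_py_alt]
    by_cases hpi : 0 ≤ PySem.Chars.find str.toList e.1.toList
    · simp only [hpi, if_pos]
      rw [m_replace_py]
      simp only [String.toList_ofList]
      rw [body_eq]
    · simp only [hpi, if_false]
      rw [body_eq]
      congr 1
      rw [slice_full]
      simp [PySem.List.slice_to, PySem.List.slice_from]
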